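-- pv_equiv track=rewrite | github.com/AsimChakraborty/Newspaper-Analysis | newapp.py | filter_news
-- ===== SOURCE A (Python) =====
-- def filter_news(news_items, filters):
--     """Filter news based on user input filters"""
--     filtered_items = []
--
--     for item in news_items:
--         matches = True
--
--         # Filter by location
--         if filters.get("location") and filters["location"]:
--             location_match = False
--             for loc in item.get("locations", []):
--                 if filters["location"].lower() in loc.lower():
--                     location_match = True
--                     break
--             if not location_match:
--                 matches = False
--
--         # Filter by name (person, organization)
--         if filters.get("name") and filters["name"]:
--             name_match = False
--             for name in item.get("names", []):
--                 if filters["name"].lower() in name.lower():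
--                     name_match = True
--                     break
--             if not name_match:
--                 matches = False
--
--         # Filter by category
--         if filters.get("category") and filters["category"]:
--             category_match = False
--             for category in item.get("categories", []):
--                 if filters["category"].lower() in category.lower():
--                     category_match = True
--                     break
--             if not category_match:
--                 matches = False
--
--         if matches:
--             filtered_items.append(item)
--
--     return filtered_items
-- ===== SOURCE B (Python) =====
-- def filter_news(news_items, filters):
--     """Filter news based on user input filters"""
--     items = list(news_items)
--     for key, field in (("location", "locations"), ("name", "names"), ("category", "categories")):
--         q = filters.get(key)
--         if q:
--             ql = q.lower()
--             items = [it for it in items if any(ql in c.lower() for c in it.get(field, []))]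
--     return items
-- ===== Notes on version B (the rewrite author's own statement) =====
-- stated objective: alternative
-- what changed: Replaces A's single loop that checks all three criteria per item with a flag variable by successive filtering passes: each active filter is applied as its own pass over the remaining list, with the query lowered once per pass instead of once per item.
import Mathlib
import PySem

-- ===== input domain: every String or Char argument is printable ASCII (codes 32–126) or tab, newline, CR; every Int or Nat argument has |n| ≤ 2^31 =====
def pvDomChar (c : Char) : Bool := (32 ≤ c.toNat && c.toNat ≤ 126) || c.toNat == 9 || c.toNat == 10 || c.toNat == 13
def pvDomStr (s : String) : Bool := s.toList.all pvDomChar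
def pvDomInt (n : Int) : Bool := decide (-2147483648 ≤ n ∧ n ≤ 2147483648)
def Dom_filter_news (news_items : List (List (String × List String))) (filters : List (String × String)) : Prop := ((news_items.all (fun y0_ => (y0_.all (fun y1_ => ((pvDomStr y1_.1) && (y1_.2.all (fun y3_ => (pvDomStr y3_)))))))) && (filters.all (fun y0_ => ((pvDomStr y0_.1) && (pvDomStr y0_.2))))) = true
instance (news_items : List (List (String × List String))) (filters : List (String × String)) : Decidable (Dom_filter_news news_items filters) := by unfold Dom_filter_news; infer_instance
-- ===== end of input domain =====

-- B replaces A's single loop (per-item flag over all three criteria) by successive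
-- filtering passes, one per active filter, with the query lowered once per pass (alternative decomposition).


-- ===== PORT A =====
-- inner 'for c in item.get(field, []): if filters[key].lower() in c.lower(): match = True; break'
def pvScanA (q : String) : List String → Bool
  | [] => false
  | c :: rest => if PySem.Str.isIn (PySem.Str.lower q) (PySem.Str.lower c) then true else pvScanA q rest

-- 'filters.get(key) and filters[key]' is truthy iff the key maps to a nonempty string,
-- ported as getD with default "" and an emptiness test (exact: None and "" are both falsy).
def filter_news (news_items : List (List (String × List String))) (filters : List (String × String)) : List (List (String × List String)) :=
  news_items.foldl (fun filtered_items item =>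
    let mtch := true
    -- Filter by location
    let fv1 := (PySem.Dict.mk filters).getD "location" ""
    let mtch := if !fv1.toList.isEmpty then
        (if pvScanA fv1 ((PySem.Dict.mk item).getD "locations" []) then mtch else false)
      else mtch
    -- Filter by name (person, organization)
    let fv2 := (PySem.Dict.mk filters).getD "name" ""
    let mtch := if !fv2.toList.isEmpty then
        (if pvScanA fv2 ((PySem.Dict.mk item).getD "names" []) then mtch else false)
      else mtch
    -- Filter by category
    let fv3 := (PySem.Dict.mk filters).getD "category" ""
    let mtch := if !fv3.toList.isEmpty then
        (if pvScanA fv3 ((PySem.Dict.mk item).getD "categories" []) then mtch else false)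
      else mtch
    if mtch then filtered_items ++ [item] else filtered_items) []

-- ===== PORT B =====
def pvSpecs : List (String × String) := [("location", "locations"), ("name", "names"), ("category", "categories")]

-- one filtering pass: keep items whose field contains a component matching the lowered query
def pvPass (ql : String) (field : String) (items : List (List (String × List String))) : List (List (String × List String)) :=
  items.filter (fun it => ((PySem.Dict.mk it).getD field []).any (fun c => PySem.Str.isIn ql (PySem.Str.lower c)))

def filter_news_alt (news_items : List (List (String × List String))) (filters : List (String × String)) : List (List (String × List String)) :=
  pvSpecs.foldl (fun items kf =>
    let q := (PySem.Dict.mk filters).getD kf.1 ""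
    if q.toList.isEmpty then items
    else pvPass (PySem.Str.lower q) kf.2 items) news_items

-- ===== PRECONDITION & SPEC =====
def Spec_filter_news (news_items : List (List (String × List String))) (filters : List (String × String)) (out : List (List (String × List String))) : Prop := out = filter_news_alt news_items filters
instance (news_items : List (List (String × List String))) (filters : List (String × String)) (out : List (List (String × List String))) : Decidable (Spec_filter_news news_items filters out) := by unfold Spec_filter_news; infer_instance

-- ===== CLAIM (what is proved, stated in full; the proofs are below) =====
def Claim_equal_filter_news : Prop := ∀ (news_items : List (List (String × List String))) (filters : List (String × String)), Dom_filter_news news_items filters → Spec_filter_news news_items filters (filter_news news_items filters)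

-- ===== LEMMAS AND PROOFS =====
-- A's break-on-first-hit scan is List.any of the same predicate
lemma pvScanA_eq_any (q : String) (l : List String) :
    pvScanA q l = l.any (fun c => PySem.Str.isIn (PySem.Str.lower q) (PySem.Str.lower c)) := by
  induction l with
  | nil => rfl
  | cons c rest ih =>
    simp only [pvScanA, List.any_cons, ih]
    cases PySem.Str.isIn (PySem.Str.lower q) (PySem.Str.lower c) <;> simp

-- one of A's flag-update blocks, as a boolean identity
lemma blk (e a m : Bool) :
    (if !e then (if a then m else false) else m) = (m && (if e then true else a)) := by
  cases e <;> cases a <;> cases m <;> rfl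

-- A's per-item guarded condition for one (key, field) spec
def pvGuard (filters : List (String × String)) (key field : String) (item : List (String × List String)) : Bool :=
  let fv := (PySem.Dict.mk filters).getD key ""
  if fv.toList.isEmpty then true
  else ((PySem.Dict.mk item).getD field []).any (fun c => PySem.Str.isIn (PySem.Str.lower fv) (PySem.Str.lower c))

-- A's whole loop body, applied, computes 'append iff the three guards all hold'
lemma body_eq (filters : List (String × String)) (item : List (String × List String))
    (acc : List (List (String × List String))) :
    (let mtch := true
     let fv1 := (PySem.Dict.mk filters).getD "location" ""
     let mtch := if !fv1.toList.isEmpty then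
         (if pvScanA fv1 ((PySem.Dict.mk item).getD "locations" []) then mtch else false)
       else mtch
     let fv2 := (PySem.Dict.mk filters).getD "name" ""
     let mtch := if !fv2.toList.isEmpty then
         (if pvScanA fv2 ((PySem.Dict.mk item).getD "names" []) then mtch else false)
       else mtch
     let fv3 := (PySem.Dict.mk filters).getD "category" ""
     let mtch := if !fv3.toList.isEmpty then
         (if pvScanA fv3 ((PySem.Dict.mk item).getD "categories" []) then mtch else false)
       else mtch
     if mtch then acc ++ [item] else acc)
    = if (pvGuard filters "location" "locations" item
          && pvGuard filters "name" "names" item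
          && pvGuard filters "category" "categories" item) then acc ++ [item] else acc := by
  simp only [pvGuard, blk, pvScanA_eq_any, Bool.true_and, Bool.and_assoc]

-- A's foldl accumulator loop is 'acc ++ filter (conjunction of the three guards)'
lemma loop_eq (filters : List (String × String)) (l : List (List (String × List String)))
    (acc : List (List (String × List String))) :
    l.foldl (fun filtered_items item =>
      let mtch := true
      let fv1 := (PySem.Dict.mk filters).getD "location" ""
      let mtch := if !fv1.toList.isEmpty then
          (if pvScanA fv1 ((PySem.Dict.mk item).getD "locations" []) then mtch else false)
        else mtch
      let fv2 := (PySem.Dict.mk filters).getD "name" ""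
      let mtch := if !fv2.toList.isEmpty then
          (if pvScanA fv2 ((PySem.Dict.mk item).getD "names" []) then mtch else false)
        else mtch
      let fv3 := (PySem.Dict.mk filters).getD "category" ""
      let mtch := if !fv3.toList.isEmpty then
          (if pvScanA fv3 ((PySem.Dict.mk item).getD "categories" []) then mtch else false)
        else mtch
      if mtch then filtered_items ++ [item] else filtered_items) acc
    = acc ++ l.filter (fun item => pvGuard filters "location" "locations" item
          && pvGuard filters "name" "names" item
          && pvGuard filters "category" "categories" item) := by
  induction l generalizing acc with
  | nil => simp
  | cons item rest ih =>
    rw [List.foldl_cons, body_eq, ih, List.filter_cons]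
    cases hc : (pvGuard filters "location" "locations" item
          && pvGuard filters "name" "names" item
          && pvGuard filters "category" "categories" item) <;> simp

-- one of B's staged passes equals filtering with A's guarded condition for that spec
lemma stage_eq (filters : List (String × String)) (key field : String)
    (items : List (List (String × List String))) :
    (let q := (PySem.Dict.mk filters).getD key ""
     if q.toList.isEmpty then items else pvPass (PySem.Str.lower q) field items)
    = items.filter (pvGuard filters key field) := by
  unfold pvPass pvGuard
  by_cases h : ((PySem.Dict.mk filters).getD key "").toList.isEmpty = true <;> simp [h]

-- ===== VERDICT (by name: the statement is the Claim_ definition above) =====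
theorem filter_news_spec : Claim_equal_filter_news := by
  intro news_items filters _
  unfold Spec_filter_news filter_news filter_news_alt
  rw [loop_eq]
  simp only [pvSpecs, List.foldl_cons, List.foldl_nil]
  rw [stage_eq, stage_eq, stage_eq, List.filter_filter, List.filter_filter, List.nil_append]
  refine List.filter_congr (fun x _ => ?_)
  cases pvGuard filters "location" "locations" x <;>
    cases pvGuard filters "name" "names" x <;>
    cases pvGuard filters "category" "categories" x <;> rfl
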